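-- pv_equiv track=rewrite | github.com/LaxmanSRawat/leet-code-solutions | 00 Initial Attempt/C______ Interview/Find valid binary sequence.py | findValidBin
-- ===== SOURCE A (Python) =====
-- def findValidBin(bin,k):
--     result = 0
--     value = 0
--     noOfOnes = 0
--     for i in bin:
--         if i == "1":
--             noOfOnes +=1
--         if i == "0":
--             value += noOfOnes
--
--         if k < value + noOfOnes:
--             return result
--         else:
--             result +=1
--     return result
-- ===== SOURCE B (Python) =====
-- def findValidBin(bin, k):
--     # The cost of a prefix (value + noOfOnes) is nondecreasing in the prefix
--     # length: a '1' adds 1, a '0' adds the current (nonnegative) ones count,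
--     # anything else adds 0.  So the answer is the largest m with cost(m) <= k,
--     # found by binary search on the prefix length.
--     def cost(m):
--         ones = 0
--         value = 0
--         for c in bin[:m]:
--             if c == "1":
--                 ones += 1
--             elif c == "0":
--                 value += ones
--         return value + ones
--
--     lo, hi = 0, len(bin)
--     while lo < hi:
--         mid = (lo + hi + 1) // 2
--         if cost(mid) <= k:
--             lo = mid
--         else:
--             hi = mid - 1
--     return lo
-- ===== Notes on version B (the rewrite author's own statement) =====
-- stated objective: alternative
-- what changed: B exploits that the prefix cost (value + noOfOnes) is nondecreasing and binary-searches the largest prefix length whose cost stays <= k, recomputing the cost of a probed prefix from scratch, instead of A's single left-to-right scan with early return.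
import Mathlib
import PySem

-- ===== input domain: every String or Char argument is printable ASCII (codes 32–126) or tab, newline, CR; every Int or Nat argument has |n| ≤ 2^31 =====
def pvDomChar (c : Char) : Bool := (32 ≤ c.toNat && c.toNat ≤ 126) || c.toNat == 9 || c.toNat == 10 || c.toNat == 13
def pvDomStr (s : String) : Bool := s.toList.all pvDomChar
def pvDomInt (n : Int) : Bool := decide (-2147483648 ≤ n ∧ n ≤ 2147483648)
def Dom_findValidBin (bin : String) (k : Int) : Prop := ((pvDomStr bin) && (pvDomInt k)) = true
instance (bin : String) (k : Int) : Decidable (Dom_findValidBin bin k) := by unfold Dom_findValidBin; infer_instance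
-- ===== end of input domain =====

-- B replaces A's early-return scan by a binary search over prefix length, using that the prefix cost (value + noOfOnes) is nondecreasing; alternative algorithm, not faster.


-- ===== PORT A =====
-- A's single loop: state (result, value, noOfOnes), early return when k < value + noOfOnes
def findValidBinLoop (k : Int) : List Char → Int → Int → Int → Int
  | [], result, _, _ => result
  | c :: rest, result, value, ones =>
    let ones' := if c = '1' then ones + 1 else ones
    let value' := if c = '0' then value + ones' else value
    if k < value' + ones' then result
    else findValidBinLoop k rest (result + 1) value' ones'

def findValidBin (bin : String) (k : Int) : Int :=
  findValidBinLoop k bin.toList 0 0 0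

-- ===== PORT B =====
-- Source B's inner cost(m) loop over bin[:m]: accumulators (value, ones), returns value + ones
def costAux : List Char → Int → Int → Int
  | [], value, ones => value + ones
  | c :: rest, value, ones =>
    if c = '1' then costAux rest value (ones + 1)
    else if c = '0' then costAux rest (value + ones) ones
    else costAux rest value ones

def costB (l : List Char) (m : Nat) : Int := costAux (l.take m) 0 0

-- Source B's binary-search loop (lo, hi are Python ints that stay nonnegative: ported as Nat)
def bsearch (l : List Char) (k : Int) (lo hi : Nat) : Nat :=
  if h : lo < hi then
    let mid := (lo + hi + 1) / 2
    if costB l mid ≤ k then bsearch l k mid hi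
    else bsearch l k lo (mid - 1)
  else lo
termination_by hi - lo
decreasing_by
  · omega
  · omega

def findValidBin_alt (bin : String) (k : Int) : Int :=
  (bsearch bin.toList k 0 bin.toList.length : Int)

-- ===== PRECONDITION & SPEC =====
def Spec_findValidBin (bin : String) (k : Int) (out : Int) : Prop := out = findValidBin_alt bin k
instance (bin : String) (k : Int) (out : Int) : Decidable (Spec_findValidBin bin k out) := by unfold Spec_findValidBin; infer_instance

-- ===== CLAIM (what is proved, stated in full; the proofs are below) =====
def Claim_equal_findValidBin : Prop := ∀ (bin : String) (k : Int), Dom_findValidBin bin k → Spec_findValidBin bin k (findValidBin bin k)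

-- ===== LEMMAS AND PROOFS =====

-- proof-side helper: length of the leading run of entries ≤ k (what A's loop counts)
def lcnt (k : Int) : List Int → Nat
  | [] => 0
  | c :: rest => if k < c then 0 else lcnt k rest + 1

-- proof-side helper: the table of prefix costs (costAux applied to growing prefixes)
def buildCosts : List Char → Int → Int → List Int
  | [], _, _ => []
  | c :: rest, value, ones =>
    let ones' := if c = '1' then ones + 1 else ones
    let value' := if c = '0' then value + ones' else value
    (value' + ones') :: buildCosts rest value' ones'

theorem findValidBinLoop_eq (k : Int) (l : List Char) :
    ∀ (result value ones : Int),
      findValidBinLoop k l result value ones = result + (lcnt k (buildCosts l value ones) : Int) := by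
  induction l with
  | nil => intro result value ones; simp [findValidBinLoop, buildCosts, lcnt]
  | cons c rest ih =>
    intro result value ones
    simp only [findValidBinLoop, buildCosts, lcnt]
    by_cases h : k < (if c = '0' then value + (if c = '1' then ones + 1 else ones) else value) + (if c = '1' then ones + 1 else ones)
    · simp only [if_pos h]; omega
    · simp only [if_neg h, ih]; push_cast; omega

theorem buildCosts_length (l : List Char) (v o : Int) : (buildCosts l v o).length = l.length := by
  induction l generalizing v o with
  | nil => simp [buildCosts]
  | cons c r ih => simp [buildCosts, ih]

theorem buildCosts_getD (l : List Char) (v o : Int) (i : Nat) (hi : i < l.length) :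
    (buildCosts l v o).getD i 0 = costAux (l.take (i + 1)) v o := by
  induction l generalizing v o i with
  | nil => simp at hi
  | cons c r ih =>
    cases i with
    | zero =>
      simp only [buildCosts, List.getD, List.take, costAux]
      by_cases h1 : c = '1' <;> by_cases h0 : c = '0' <;> simp_all
    | succ j =>
      simp only [buildCosts, List.take]
      have hj : j < r.length := by simpa using hi
      have := ih (if c = '0' then v + (if c = '1' then o + 1 else o) else v)
        (if c = '1' then o + 1 else o) j hj
      by_cases h1 : c = '1' <;> by_cases h0 : c = '0' <;> simp_all [costAux, List.getD]

-- the final cost is at least value + ones, when ones ≥ 0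
theorem costAux_ge (t : List Char) : ∀ (v o : Int), 0 ≤ o → v + o ≤ costAux t v o := by
  induction t with
  | nil => intro v o _; simp [costAux]
  | cons c r ih =>
    intro v o ho
    simp only [costAux]
    by_cases h1 : c = '1'
    · simp only [if_pos h1]
      have := ih v (o + 1) (by omega); omega
    · simp only [if_neg h1]
      by_cases h0 : c = '0'
      · simp only [if_pos h0]
        have := ih (v + o) o ho; omega
      · simp only [if_neg h0]; exact ih v o ho

-- appending characters cannot decrease the cost, when ones ≥ 0
theorem costAux_append (s t : List Char) :
    ∀ (v o : Int), 0 ≤ o → costAux s v o ≤ costAux (s ++ t) v o := by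
  induction s with
  | nil =>
    intro v o ho
    simpa [costAux] using costAux_ge t v o ho
  | cons c r ih =>
    intro v o ho
    simp only [List.cons_append, costAux]
    by_cases h1 : c = '1'
    · simp only [if_pos h1]; exact ih _ _ (by omega)
    · simp only [if_neg h1]
      by_cases h0 : c = '0'
      · simp only [if_pos h0]; exact ih _ _ ho
      · simp only [if_neg h0]; exact ih _ _ ho

theorem costB_mono (l : List Char) {m m' : Nat} (h : m ≤ m') : costB l m ≤ costB l m' := by
  unfold costB
  have hsplit : l.take m' = l.take m ++ (l.take m').drop m := by
    conv_lhs => rw [← List.take_append_drop m (l.take m')]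
    rw [List.take_take, Nat.min_eq_left h]
  rw [hsplit]
  exact costAux_append _ _ 0 0 le_rfl

theorem lcnt_le_length (k : Int) (xs : List Int) : lcnt k xs ≤ xs.length := by
  induction xs with
  | nil => simp [lcnt]
  | cons c r ih =>
    simp only [lcnt, List.length_cons]
    split
    · omega
    · omega

theorem lcnt_lt (k : Int) (xs : List Int) : ∀ (j : Nat), j < lcnt k xs → xs.getD j 0 ≤ k := by
  induction xs with
  | nil => intro j hj; simp [lcnt] at hj
  | cons c r ih =>
    intro j hj
    simp only [lcnt] at hj
    by_cases h : k < c
    · simp [h] at hj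
    · simp only [if_neg h] at hj
      cases j with
      | zero => simpa [List.getD] using le_of_not_gt h
      | succ i => simpa [List.getD] using ih i (by omega)

theorem lcnt_stop (k : Int) (xs : List Int) (h : lcnt k xs < xs.length) :
    k < xs.getD (lcnt k xs) 0 := by
  induction xs with
  | nil => simp at h
  | cons c r ih =>
    simp only [lcnt] at h ⊢
    by_cases hk : k < c
    · simp [hk, List.getD]
    · simp only [if_neg hk] at h ⊢
      have := ih (by simpa using h)
      simpa [List.getD] using this

-- binary search postcondition
theorem bsearch_correct (l : List Char) (k : Int) :
    ∀ (lo hi : Nat), lo ≤ hi →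
      lo ≤ bsearch l k lo hi ∧ bsearch l k lo hi ≤ hi ∧
      (costB l (bsearch l k lo hi) ≤ k ∨ bsearch l k lo hi = lo) ∧
      (k < costB l (bsearch l k lo hi + 1) ∨ bsearch l k lo hi = hi) := by
  intro lo hi
  induction hnat : hi - lo using Nat.strong_induction_on generalizing lo hi with
  | _ d ih =>
    intro hle
    rw [bsearch]
    by_cases h : lo < hi
    · simp only [dif_pos h]
      set mid := (lo + hi + 1) / 2 with hmid
      have hmid1 : lo < mid := by omega
      have hmid2 : mid ≤ hi := by omega
      by_cases hc : costB l mid ≤ k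
      · simp only [if_pos hc]
        have := ih (hi - mid) (by omega) mid hi rfl hmid2
        refine ⟨by omega, this.2.1, ?_, this.2.2.2⟩
        rcases this.2.2.1 with h' | h'
        · exact Or.inl h'
        · exact Or.inl (by rw [h']; exact hc)
      · simp only [if_neg hc]
        have := ih ((mid - 1) - lo) (by omega) lo (mid - 1) rfl (by omega)
        refine ⟨this.1, by omega, this.2.2.1, ?_⟩
        rcases this.2.2.2 with h' | h'
        · exact Or.inl h'
        · left
          have heq : bsearch l k lo (mid - 1) + 1 = mid := by omega
          rw [heq]; omega
    · simp only [dif_neg h]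
      exact ⟨le_rfl, by omega, Or.inr (by simp), Or.inr (by omega)⟩

-- ===== VERDICT (by name: the statement is the Claim_ definition above) =====
theorem findValidBin_spec : Claim_equal_findValidBin := by
  intro bin k _
  unfold Spec_findValidBin findValidBin findValidBin_alt
  rw [findValidBinLoop_eq]
  set l := bin.toList with hl
  set n := l.length with hn
  set a := lcnt k (buildCosts l 0 0) with ha
  set r := bsearch l k 0 n with hr
  have hblen : (buildCosts l 0 0).length = n := buildCosts_length l 0 0
  have haLe : a ≤ n := by rw [ha, ← hblen]; exact lcnt_le_length k _
  obtain ⟨_, hr2, hr3, hr4⟩ := bsearch_correct l k 0 n (Nat.zero_le n)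
  have key : a = r := by
    rcases Nat.lt_trichotomy a r with hlt | heq | hgt
    · -- a < r : buildCosts[a] = cost (a+1) ≤ cost r ≤ k, contradicting lcnt_stop
      exfalso
      have hrk : costB l r ≤ k := by
        rcases hr3 with h' | h'
        · exact h'
        · omega
      have hstop : k < (buildCosts l 0 0).getD a 0 := lcnt_stop k _ (by omega)
      rw [buildCosts_getD l 0 0 a (by omega)] at hstop
      have hmono : costB l (a + 1) ≤ costB l r := costB_mono l (by omega)
      simp only [costB] at hmono hrk
      omega
    · exact heq
    · -- r < a : buildCosts[r] = cost (r+1) ≤ k, contradicting the crossing at r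
      exfalso
      have hrn : r < n := by omega
      have hcr : k < costB l (r + 1) := by
        rcases hr4 with h' | h'
        · exact h'
        · omega
      have hlt' := lcnt_lt k (buildCosts l 0 0) r (by omega)
      rw [buildCosts_getD l 0 0 r (by omega)] at hlt'
      simp only [costB] at hcr
      omega
  omega
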